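-- pv_equiv track=rewrite | github.com/AP-MI-2021/lab-3-catarotaru231 | main.py | get_longest_all_not_prime
-- ===== SOURCE A (Python) =====
-- def prime(n):
--
--     '''
--     determina daca un numar este neprim sau nu
--     :param n:
--     :return:
--     '''
--
--     for d in range(2,n // 2):
--         if(n % d == 0):
--             return True
--     return False
--
-- def get_longest_all_not_prime(lst):
--
--     '''
--     determina secventa de lungime maximala care are toate numere neprime
--     :param lst:
--     :return:
--     '''
--
--     temp = []
--     rez = []
--     for i in lst:
--         if(prime(i) == True):
--             temp.append(i)
--         else:
--             if(len(temp) > len(rez)):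
--                 rez = temp.copy()
--             temp.clear()
--         if (len(temp) > len(rez)):
--             rez = temp.copy()
--     return rez
-- ===== SOURCE B (Python) =====
-- def prime(n):
--     for d in range(2, n // 2):
--         if n % d == 0:
--             return True
--     return False
--
--
-- def get_longest_all_not_prime(lst):
--     # Phase 1: split lst into its maximal runs of prime()-true elements.
--     runs = []
--     cur = []
--     for x in lst:
--         if prime(x):
--             cur.append(x)
--         elif cur:
--             runs.append(cur)
--             cur = []
--     if cur:
--         runs.append(cur)
--     # Phase 2: select the first longest run (first-longest wins ties).
--     best = []
--     for r in runs:
--         if len(r) > len(best):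
--             best = r
--     return best
-- ===== Notes on version B (the rewrite author's own statement) =====
-- stated objective: alternative
-- what changed: B first splits the list into all maximal runs of the predicate and then selects the first longest run in a separate pass, instead of A's single scan that maintains a best-so-far copy while building the current run.
import Mathlib
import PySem

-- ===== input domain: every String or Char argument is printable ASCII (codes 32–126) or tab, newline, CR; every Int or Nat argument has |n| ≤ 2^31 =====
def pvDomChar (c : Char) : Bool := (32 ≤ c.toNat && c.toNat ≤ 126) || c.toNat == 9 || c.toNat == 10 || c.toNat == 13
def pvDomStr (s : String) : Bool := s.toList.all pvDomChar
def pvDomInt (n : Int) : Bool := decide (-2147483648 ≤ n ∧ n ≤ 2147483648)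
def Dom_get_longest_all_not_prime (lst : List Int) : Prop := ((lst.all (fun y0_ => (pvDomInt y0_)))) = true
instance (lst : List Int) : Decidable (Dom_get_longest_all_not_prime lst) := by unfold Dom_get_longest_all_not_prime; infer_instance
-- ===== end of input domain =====

-- B groups the list into all maximal runs of the predicate first and then selects the
-- first longest run in a separate pass, instead of A's one scan with a best-so-far copy.

-- ===== PORT A =====
-- prime(n): 'for d in range(2, n//2): if n % d == 0: return True' / 'return False'
-- (shared helper; Source B keeps it verbatim). The lazy range with early return is ported as a
-- fuel recursion over d; the fuel counts exactly the range's (n//2 - 2) iterations.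
def primeLoop (n : Int) : Nat → Int → Bool
  | 0, _ => false
  | fuel + 1, d => if PySem.Int.mod n d == 0 then true else primeLoop n fuel (d + 1)

def primePy (n : Int) : Bool :=
  primeLoop n (PySem.Int.floordiv n 2 - 2).toNat 2

-- one iteration of A's for-loop over state (temp, rez)
def stepA (s : List Int × List Int) (i : Int) : List Int × List Int :=
  let s1 :=
    if primePy i == true then (s.1 ++ [i], s.2)
    else (([] : List Int), if s.2.length < s.1.length then s.1 else s.2)
  if s1.2.length < s1.1.length then (s1.1, s1.1) else s1

def get_longest_all_not_prime (lst : List Int) : List Int :=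
  (lst.foldl stepA (([] : List Int), ([] : List Int))).2

-- ===== PORT B =====
-- one iteration of B's first loop over state (runs, cur)
def stepR (s : List (List Int) × List Int) (x : Int) : List (List Int) × List Int :=
  if primePy x then (s.1, s.2 ++ [x])
  else if s.2.isEmpty then s else (s.1 ++ [s.2], ([] : List Int))

-- B's second loop: first longest run wins
def selectLongest (runs : List (List Int)) : List Int :=
  runs.foldl (fun b r => if b.length < r.length then r else b) ([] : List Int)

def get_longest_all_not_prime_alt (lst : List Int) : List Int :=
  let p := lst.foldl stepR (([] : List (List Int)), ([] : List Int))
  let runs := if p.2.isEmpty then p.1 else p.1 ++ [p.2]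
  selectLongest runs

-- ===== PRECONDITION & SPEC =====
def Spec_get_longest_all_not_prime (lst : List Int) (out : List Int) : Prop := out = get_longest_all_not_prime_alt lst
instance (lst : List Int) (out : List Int) : Decidable (Spec_get_longest_all_not_prime lst out) := by unfold Spec_get_longest_all_not_prime; infer_instance

-- ===== CLAIM (what is proved, stated in full; the proofs are below) =====
def Claim_equal_get_longest_all_not_prime : Prop := ∀ (lst : List Int), Dom_get_longest_all_not_prime lst → Spec_get_longest_all_not_prime lst (get_longest_all_not_prime lst)

-- ===== LEMMAS AND PROOFS =====

-- "keep a, unless b is strictly longer" — the common tie-breaking choice of both programs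
def better (a b : List Int) : List Int := if a.length < b.length then b else a

-- proof-only characterisation: the first longest maximal run of primePy-true elements
def bestRun : List Int → List Int
  | [] => []
  | x :: xs =>
    if primePy x then
      let head := x :: xs.takeWhile primePy
      let rest := bestRun (xs.dropWhile primePy)
      if head.length < rest.length then rest else head
    else bestRun xs
termination_by l => l.length
decreasing_by
  · simpa using Nat.lt_succ_of_le (xs.length_dropWhile_le _)
  · simp

theorem better_nil_left (y : List Int) : better [] y = y := by
  cases y <;> simp [better]

theorem better_nil_right (y : List Int) : better y [] = y := by
  simp [better]

theorem better_assoc (a b c : List Int) :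
    better (better a b) c = better a (better b c) := by
  unfold better
  split_ifs <;> first | rfl | omega

theorem bestRun_eq (l : List Int) :
    bestRun l = better (l.takeWhile primePy) (bestRun (l.dropWhile primePy)) := by
  cases l with
  | nil => simp [bestRun, better]
  | cons x xs =>
    by_cases h : primePy x
    · simp [bestRun, h, better]
    · simp [bestRun, h, better_nil_left]

-- A's scan, from any reachable state (temp, rez) with temp no longer than rez
theorem foldA_eq (l : List Int) : ∀ (temp rez : List Int), temp.length ≤ rez.length →
    (l.foldl stepA (temp, rez)).2 =
      better (better rez (temp ++ l.takeWhile primePy)) (bestRun (l.dropWhile primePy)) := by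
  induction l with
  | nil =>
    intro temp rez h
    simp [bestRun, better]
    omega
  | cons x xs ih =>
    intro temp rez h
    by_cases hx : primePy x
    · have hstep : stepA (temp, rez) x =
          if rez.length < temp.length + 1 then (temp ++ [x], temp ++ [x])
          else (temp ++ [x], rez) := by
        simp [stepA, hx]
      have hap : temp ++ [x] ++ xs.takeWhile primePy = temp ++ x :: xs.takeWhile primePy := by
        simp
      rw [List.foldl_cons, hstep, List.takeWhile_cons_of_pos hx, List.dropWhile_cons_of_pos hx]
      by_cases hlt : rez.length < temp.length + 1
      · rw [if_pos hlt, ih _ _ le_rfl, hap]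
        rcases Nat.eq_zero_or_pos (xs.takeWhile primePy).length with h0 | h0
        · have htw : xs.takeWhile primePy = [] := List.length_eq_zero_iff.mp h0
          simp [htw, better, hlt]
        · have c1 : (temp ++ [x]).length < (temp ++ x :: xs.takeWhile primePy).length := by
            simp; omega
          have c2 : rez.length < (temp ++ x :: xs.takeWhile primePy).length := by
            simp; omega
          unfold better
          rw [if_pos c1, if_pos c2]
      · rw [if_neg hlt, ih (temp ++ [x]) rez (by simp; omega), hap]
    · have hx' : primePy x = false := by simpa using hx
      have hr : ¬ rez.length < temp.length := by omega
      have hstep : stepA (temp, rez) x = ([], rez) := by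
        simp [stepA, hx', hr]
      have hbr : bestRun (x :: xs) = bestRun xs := by simp [bestRun, hx']
      rw [List.foldl_cons, hstep, ih [] rez (by simp),
        List.takeWhile_cons_of_neg hx, List.dropWhile_cons_of_neg hx, hbr, bestRun_eq xs,
        ← better_assoc]
      have hbt : better rez (temp ++ []) = rez := by
        unfold better
        rw [if_neg (by simpa using hr)]
      rw [hbt]
      simp

-- selectLongest over an appended run
theorem selectLongest_append (rs : List (List Int)) (c : List Int) :
    selectLongest (rs ++ [c]) = better (selectLongest rs) c := by
  simp [selectLongest, better, List.foldl_append]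

-- B's grouping scan, from any state (rs, cur)
theorem foldR_eq (l : List Int) : ∀ (rs : List (List Int)) (cur : List Int),
    selectLongest (let p := l.foldl stepR (rs, cur);
                   if p.2.isEmpty then p.1 else p.1 ++ [p.2]) =
      better (better (selectLongest rs) (cur ++ l.takeWhile primePy))
             (bestRun (l.dropWhile primePy)) := by
  induction l with
  | nil =>
    intro rs cur
    by_cases hc : cur.isEmpty
    · have hcur : cur = [] := by simpa [List.isEmpty_iff] using hc
      simp [hcur, bestRun, better_nil_right]
    · simp only [List.foldl_nil, hc, Bool.false_eq_true, if_neg, not_false_iff]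
      rw [selectLongest_append]
      simp [bestRun, better_nil_right]
  | cons x xs ih =>
    intro rs cur
    by_cases hx : primePy x
    · have hstep : stepR (rs, cur) x = (rs, cur ++ [x]) := by simp [stepR, hx]
      rw [List.foldl_cons, hstep, ih rs (cur ++ [x]),
        List.takeWhile_cons_of_pos hx, List.dropWhile_cons_of_pos hx]
      simp
    · have hx' : primePy x = false := by simpa using hx
      have hbr : bestRun (x :: xs) = bestRun xs := by simp [bestRun, hx']
      by_cases hc : cur.isEmpty
      · have hcur : cur = [] := by simpa [List.isEmpty_iff] using hc
        have hstep : stepR (rs, cur) x = (rs, cur) := by simp [stepR, hx', hc]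
        rw [List.foldl_cons, hstep, ih rs cur,
          List.takeWhile_cons_of_neg hx, List.dropWhile_cons_of_neg hx, hbr, bestRun_eq xs,
          ← better_assoc, hcur]
        simp [better_nil_right]
      · have hstep : stepR (rs, cur) x = (rs ++ [cur], []) := by simp [stepR, hx', hc]
        rw [List.foldl_cons, hstep, ih (rs ++ [cur]) [], selectLongest_append,
          List.takeWhile_cons_of_neg hx, List.dropWhile_cons_of_neg hx, hbr, bestRun_eq xs,
          ← better_assoc]
        simp

-- ===== VERDICT (by name: the statement is the Claim_ definition above) =====
theorem get_longest_all_not_prime_spec : Claim_equal_get_longest_all_not_prime := by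
  intro lst _
  unfold Spec_get_longest_all_not_prime get_longest_all_not_prime get_longest_all_not_prime_alt
  rw [foldA_eq lst [] [] le_rfl, foldR_eq lst [] []]
  simp [selectLongest]
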